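-- pv_equiv track=rewrite | github.com/harikrishnabenz/masterthesis_hk | segmentation/sam2/workflow_datasplitting.py | _compute_splits
-- ===== SOURCE A (Python) =====
-- from typing import List, Tuple
--
-- def _compute_splits(total: int, num_splits: int) -> List[Tuple[int, int]]:
--     """Divide *total* items into *num_splits* groups.
--
--     Returns a list of ``(start_index, end_index)`` tuples (end exclusive).
--     If the total is not evenly divisible, earlier parts get the extra items.
--
--     Examples
--     --------
--     >>> _compute_splits(10, 3)   # 4 + 3 + 3
--     [(0, 4), (4, 7), (7, 10)]
--     >>> _compute_splits(9, 3)    # 3 + 3 + 3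
--     [(0, 3), (3, 6), (6, 9)]
--     >>> _compute_splits(7, 3)    # 3 + 2 + 2
--     [(0, 3), (3, 5), (5, 7)]
--     """
--     base_size = total // num_splits
--     remainder = total % num_splits
--     splits: List[Tuple[int, int]] = []
--     start = 0
--     for i in range(num_splits):
--         size = base_size + (1 if i < remainder else 0)
--         splits.append((start, start + size))
--         start += size
--     return splits
-- ===== SOURCE B (Python) =====
-- def _compute_splits(total, num_splits):
--     base = total // num_splits
--     rem = total % num_splits
--     return [(i * base + min(i, rem), (i + 1) * base + min(i + 1, rem))
--             for i in range(num_splits)]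
-- ===== Notes on version B (the rewrite author's own statement) =====
-- stated objective: alternative
-- what changed: Replaces the accumulator loop (running start, append per step) with a single comprehension computing each boundary directly from the closed form i*base + min(i, remainder).
import Mathlib
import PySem

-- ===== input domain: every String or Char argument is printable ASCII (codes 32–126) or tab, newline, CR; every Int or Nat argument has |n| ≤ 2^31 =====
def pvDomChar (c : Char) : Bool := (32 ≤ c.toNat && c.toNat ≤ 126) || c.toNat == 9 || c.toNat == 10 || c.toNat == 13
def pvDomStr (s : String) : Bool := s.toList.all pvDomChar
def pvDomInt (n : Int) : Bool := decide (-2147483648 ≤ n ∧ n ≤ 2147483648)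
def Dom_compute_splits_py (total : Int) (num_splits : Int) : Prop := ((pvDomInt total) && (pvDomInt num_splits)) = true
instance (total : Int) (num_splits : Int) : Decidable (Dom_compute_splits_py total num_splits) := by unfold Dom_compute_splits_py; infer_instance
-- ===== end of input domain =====

-- B replaces A's running-start accumulator loop by a comprehension computing each
-- boundary directly from the closed form i*base + min(i, remainder) (alternative, same cost).

-- ===== PORT A =====
-- literal transliteration of A: base/remainder, then a for-loop carrying (splits, start)
def compute_splits_py (total : Int) (num_splits : Int) : List (Int × Int) :=
  let base_size := PySem.Int.floordiv total num_splits
  let remainder := PySem.Int.mod total num_splits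
  let st := (PySem.List.pyRange 0 num_splits 1).foldl
    (fun (acc : List (Int × Int) × Int) i =>
      let size := base_size + (if i < remainder then 1 else 0)
      (acc.1 ++ [(acc.2, acc.2 + size)], acc.2 + size))
    ([], 0)
  st.1

-- ===== PORT B =====
-- literal transliteration of B: per-index closed-form boundaries, no accumulator
def compute_splits_py_alt (total : Int) (num_splits : Int) : List (Int × Int) :=
  let base := PySem.Int.floordiv total num_splits
  let rem := PySem.Int.mod total num_splits
  (PySem.List.pyRange 0 num_splits 1).map
    (fun i => (i * base + min i rem, (i + 1) * base + min (i + 1) rem))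

-- ===== PRECONDITION & SPEC =====
-- Pre_ excludes exactly num_splits = 0, where both Pythons raise ZeroDivisionError on '//'.
def Pre_compute_splits_py (total : Int) (num_splits : Int) : Prop := num_splits ≠ 0
instance (total : Int) (num_splits : Int) : Decidable (Pre_compute_splits_py total num_splits) := by unfold Pre_compute_splits_py; infer_instance
def pvWitness_compute_splits_py : Int × Int := (10, 3)

def Spec_compute_splits_py (total : Int) (num_splits : Int) (out : List (Int × Int)) : Prop := out = compute_splits_py_alt total num_splits
instance (total : Int) (num_splits : Int) (out : List (Int × Int)) : Decidable (Spec_compute_splits_py total num_splits out) := by unfold Spec_compute_splits_py; infer_instance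

-- ===== CLAIM (what is proved, stated in full; the proofs are below) =====
def Claim_equal_compute_splits_py : Prop := ∀ (total : Int) (num_splits : Int), Dom_compute_splits_py total num_splits → Pre_compute_splits_py total num_splits → Spec_compute_splits_py total num_splits (compute_splits_py total num_splits)

-- ===== LEMMAS AND PROOFS =====

-- loop invariant of A: after i = 0..m-1, splits is B's map and start is m*base + min m rem
theorem compute_splits_loop_inv (base rem : Int) (hrem : 0 ≤ rem) (m : Nat) :
    (PySem.List.pyRange 0 (m : Int) 1).foldl
      (fun (acc : List (Int × Int) × Int) i =>
        let size := base + (if i < rem then 1 else 0)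
        (acc.1 ++ [(acc.2, acc.2 + size)], acc.2 + size))
      ([], 0)
    = ((PySem.List.pyRange 0 (m : Int) 1).map
        (fun i => (i * base + min i rem, (i + 1) * base + min (i + 1) rem)),
       (m : Int) * base + min (m : Int) rem) := by
  induction m with
  | zero => simp [min_eq_left hrem]
  | succ m ih =>
    have h1 : ((m + 1 : Nat) : Int) = (m : Int) + 1 := by push_cast; ring
    rw [h1, PySem.List.pyRange_one_succ_right (by positivity)]
    simp only [List.foldl_append, List.map_append, ih, List.foldl_cons, List.foldl_nil,
      List.map_cons, List.map_nil]
    rw [Prod.mk.injEq]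
    have hmin : min ((m : Int) + 1) rem
        = min (m : Int) rem + (if (m : Int) < rem then 1 else 0) := by
      by_cases h : (m : Int) < rem <;> simp only [h, if_true, if_false] <;> omega
    refine ⟨?_, ?_⟩
    · rw [hmin]
      congr 2
      · ring_nf
    · rw [hmin]; ring

-- ===== VERDICT (by name: the statement is the Claim_ definition above) =====
theorem compute_splits_py_spec : Claim_equal_compute_splits_py := by
  intro total num_splits _ hpre
  unfold Spec_compute_splits_py compute_splits_py compute_splits_py_alt
  rcases lt_trichotomy num_splits 0 with hn | hn | hn
  · simp [PySem.List.pyRange_one_eq_nil (le_of_lt hn)]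
  · exact absurd hn hpre
  · have hrem : 0 ≤ PySem.Int.mod total num_splits := (PySem.Int.mod_nonneg total hn)
    obtain ⟨m, hm⟩ : ∃ m : Nat, num_splits = (m : Int) := ⟨num_splits.toNat, by omega⟩
    subst hm
    simpa using congrArg Prod.fst
      (compute_splits_loop_inv (PySem.Int.floordiv total m) (PySem.Int.mod total m) hrem m)
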